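-- pv_equiv track=rewrite | github.com/ryrobes/larsql | rvbbit/rvbbit/sql_tools/lazy_attach.py | _clickhouse_type_to_duckdb
-- ===== SOURCE A (Python) =====
-- def _clickhouse_type_to_duckdb(ch_type: str) -> str:
--     """Map ClickHouse types to DuckDB types."""
--     ch_type_upper = ch_type.upper()
--
--     # Handle Nullable wrapper
--     if ch_type_upper.startswith('NULLABLE('):
--         inner = ch_type[9:-1]  # Strip Nullable(...)
--         return _clickhouse_type_to_duckdb(inner)
--
--     # Basic type mappings
--     type_map = {
--         'STRING': 'VARCHAR',
--         'FIXEDSTRING': 'VARCHAR',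
--         'UUID': 'VARCHAR',
--         'INT8': 'TINYINT',
--         'INT16': 'SMALLINT',
--         'INT32': 'INTEGER',
--         'INT64': 'BIGINT',
--         'UINT8': 'UTINYINT',
--         'UINT16': 'USMALLINT',
--         'UINT32': 'UINTEGER',
--         'UINT64': 'UBIGINT',
--         'FLOAT32': 'FLOAT',
--         'FLOAT64': 'DOUBLE',
--         'BOOL': 'BOOLEAN',
--         'BOOLEAN': 'BOOLEAN',
--         'DATE': 'DATE',
--         'DATE32': 'DATE',
--         'DATETIME': 'TIMESTAMP',
--         'DATETIME64': 'TIMESTAMP',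
--     }
--
--     # Check exact matches
--     for ch, duck in type_map.items():
--         if ch_type_upper == ch or ch_type_upper.startswith(ch + '('):
--             return duck
--
--     # Handle Decimal
--     if ch_type_upper.startswith('DECIMAL'):
--         return ch_type  # DuckDB supports DECIMAL(p,s) syntax
--
--     # Handle Array types
--     if ch_type_upper.startswith('ARRAY('):
--         inner = ch_type[6:-1]
--         inner_duck = _clickhouse_type_to_duckdb(inner)
--         return f"{inner_duck}[]"
--
--     # Handle Enum
--     if ch_type_upper.startswith('ENUM'):
--         return 'VARCHAR'
--
--     # Default fallback
--     return 'VARCHAR'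
-- ===== SOURCE B (Python) =====
-- _TYPE_MAP = {
--     'STRING': 'VARCHAR',
--     'FIXEDSTRING': 'VARCHAR',
--     'UUID': 'VARCHAR',
--     'INT8': 'TINYINT',
--     'INT16': 'SMALLINT',
--     'INT32': 'INTEGER',
--     'INT64': 'BIGINT',
--     'UINT8': 'UTINYINT',
--     'UINT16': 'USMALLINT',
--     'UINT32': 'UINTEGER',
--     'UINT64': 'UBIGINT',
--     'FLOAT32': 'FLOAT',
--     'FLOAT64': 'DOUBLE',
--     'BOOL': 'BOOLEAN',
--     'BOOLEAN': 'BOOLEAN',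
--     'DATE': 'DATE',
--     'DATE32': 'DATE',
--     'DATETIME': 'TIMESTAMP',
--     'DATETIME64': 'TIMESTAMP',
-- }
--
--
-- def _clickhouse_type_to_duckdb(ch_type: str) -> str:
--     """Map ClickHouse types to DuckDB types (iterative unwrap + O(1) lookup)."""
--     s = ch_type
--     arrays = 0
--     # Iteratively peel wrappers, counting Array nestings.
--     while True:
--         u = s.upper()
--         if u.startswith('NULLABLE('):
--             s = s[9:-1]
--         elif u.startswith('ARRAY('):
--             s = s[6:-1]
--             arrays += 1
--         else:
--             break
--     # Base key: uppercase, cut at the first '('.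
--     base = s.upper().partition('(')[0]
--     duck = _TYPE_MAP.get(base)
--     if duck is not None:
--         core = duck
--     elif base.startswith('DECIMAL'):
--         core = s  # DuckDB supports DECIMAL(p,s) syntax; keep original case
--     else:
--         core = 'VARCHAR'  # Enum and any unknown type
--     return core + '[]' * arrays
-- ===== Notes on version B (the rewrite author's own statement) =====
-- stated objective: simpler
-- what changed: Replaces A's recursion and its linear startswith-scan over the type map by a single iterative wrapper-peeling loop that accumulates the number of Array nestings, followed by one O(1) dict lookup of the base key (uppercased, cut at the first '('), merging the Enum branch with the VARCHAR fallback.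
import Mathlib
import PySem

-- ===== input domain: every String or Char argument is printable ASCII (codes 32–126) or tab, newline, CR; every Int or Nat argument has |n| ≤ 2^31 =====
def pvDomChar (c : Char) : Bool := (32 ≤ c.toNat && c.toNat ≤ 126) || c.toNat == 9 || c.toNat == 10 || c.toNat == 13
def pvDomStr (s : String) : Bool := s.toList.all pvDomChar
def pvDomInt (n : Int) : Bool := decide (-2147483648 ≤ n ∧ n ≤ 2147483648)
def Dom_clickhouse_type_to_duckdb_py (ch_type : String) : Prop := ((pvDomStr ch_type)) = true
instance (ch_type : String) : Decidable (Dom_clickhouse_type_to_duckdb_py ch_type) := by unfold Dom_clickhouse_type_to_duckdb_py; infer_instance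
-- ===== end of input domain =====

-- B replaces A's recursion and its linear startswith-scan of the type map by one iterative
-- wrapper-peeling loop that counts Array nestings, followed by a single dict lookup of the
-- base key (objective: simpler; return value proved equal on every input).

-- ===== PORT A =====
-- the type_map dict literal shared by both programs (A iterates it; B's _TYPE_MAP holds the same pairs)
def chTypeTable : List (String × String) :=
  [("STRING", "VARCHAR"), ("FIXEDSTRING", "VARCHAR"), ("UUID", "VARCHAR"),
   ("INT8", "TINYINT"), ("INT16", "SMALLINT"), ("INT32", "INTEGER"), ("INT64", "BIGINT"),
   ("UINT8", "UTINYINT"), ("UINT16", "USMALLINT"), ("UINT32", "UINTEGER"), ("UINT64", "UBIGINT"),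
   ("FLOAT32", "FLOAT"), ("FLOAT64", "DOUBLE"),
   ("BOOL", "BOOLEAN"), ("BOOLEAN", "BOOLEAN"),
   ("DATE", "DATE"), ("DATE32", "DATE"), ("DATETIME", "TIMESTAMP"), ("DATETIME64", "TIMESTAMP")]

-- A's body over the code points; ch_type.upper() = PySem.Chars.upper, ch_type[a:-1] is ported as
-- (cs.drop a).dropLast (exact for every length), the for-loop over type_map.items() as find?
def chA (cs : List Char) : String :=
  if "NULLABLE(".toList.isPrefixOf (PySem.Chars.upper cs) then
    chA ((cs.drop 9).dropLast)
  else
    match chTypeTable.find? (fun p => (PySem.Chars.upper cs) == p.1.toList || (p.1.toList ++ ['(']).isPrefixOf (PySem.Chars.upper cs)) with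
    | some p => p.2
    | none =>
      if "DECIMAL".toList.isPrefixOf (PySem.Chars.upper cs) then String.ofList cs
      else if "ARRAY(".toList.isPrefixOf (PySem.Chars.upper cs) then chA ((cs.drop 6).dropLast) ++ "[]"
      else if "ENUM".toList.isPrefixOf (PySem.Chars.upper cs) then "VARCHAR"
      else "VARCHAR"
termination_by cs.length
decreasing_by
  · have h9 := (List.isPrefixOf_iff_prefix.mp (by assumption)).length_le
    simp [PySem.Chars.upper] at h9 ⊢; omega
  · have h6 := (List.isPrefixOf_iff_prefix.mp (by assumption)).length_le
    simp [PySem.Chars.upper] at h6 ⊢; omega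

def clickhouse_type_to_duckdb_py (ch_type : String) : String := chA ch_type.toList

-- ===== PORT B =====
def chTypeDict : PySem.Dict String String := PySem.Dict.ofList chTypeTable

-- B's while loop; state = (s, arrays); s[a:-1] ported as (cs.drop a).dropLast (exact)
def chStrip (cs : List Char) (n : Nat) : List Char × Nat :=
  if "NULLABLE(".toList.isPrefixOf (PySem.Chars.upper cs) then chStrip ((cs.drop 9).dropLast) n
  else if "ARRAY(".toList.isPrefixOf (PySem.Chars.upper cs) then chStrip ((cs.drop 6).dropLast) (n + 1)
  else (cs, n)
termination_by cs.length
decreasing_by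
  · have h9 := (List.isPrefixOf_iff_prefix.mp (by assumption)).length_le
    simp [PySem.Chars.upper] at h9 ⊢; omega
  · have h6 := (List.isPrefixOf_iff_prefix.mp (by assumption)).length_le
    simp [PySem.Chars.upper] at h6 ⊢; omega

-- B's code after the loop; s.upper().partition('(')[0] = takeWhile (· ≠ '(') of the uppercase
-- (exact), _TYPE_MAP.get = Dict.get?, '[]' * arrays = String.join (List.replicate arrays "[]")
def chFinish (p : List Char × Nat) : String :=
  let base := String.ofList ((PySem.Chars.upper p.1).takeWhile (fun c => c ≠ '('))
  let core :=
    match chTypeDict.get? base with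
    | some duck => duck
    | none => if "DECIMAL".toList.isPrefixOf base.toList then String.ofList p.1 else "VARCHAR"
  core ++ String.join (List.replicate p.2 "[]")

def clickhouse_type_to_duckdb_py_alt (ch_type : String) : String :=
  chFinish (chStrip ch_type.toList 0)

-- ===== PRECONDITION & SPEC =====
def Spec_clickhouse_type_to_duckdb_py (ch_type : String) (out : String) : Prop := out = clickhouse_type_to_duckdb_py_alt ch_type
instance (ch_type : String) (out : String) : Decidable (Spec_clickhouse_type_to_duckdb_py ch_type out) := by unfold Spec_clickhouse_type_to_duckdb_py; infer_instance

-- ===== CLAIM (what is proved, stated in full; the proofs are below) =====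
def Claim_equal_clickhouse_type_to_duckdb_py : Prop := ∀ (ch_type : String), Dom_clickhouse_type_to_duckdb_py ch_type → Spec_clickhouse_type_to_duckdb_py ch_type (clickhouse_type_to_duckdb_py ch_type)

-- ===== LEMMAS AND PROOFS =====


theorem all_ne_takeWhile (k t : List Char) (hall : ∀ c ∈ k, c ≠ '(') :
    (k ++ t).takeWhile (fun c => c ≠ '(') = k ++ t.takeWhile (fun c => c ≠ '(') := by
  induction k with
  | nil => simp
  | cons a k ih =>
    have hd : decide (a ≠ '(') = true := by simp [hall a (by simp)]
    simp only [List.cons_append, List.takeWhile_cons]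
    rw [hd]
    simp only [if_true]
    exact congrArg (a :: ·) (ih (fun c hc => hall c (List.mem_cons_of_mem _ hc)))

theorem dropWhile_head_not {α : Type} (p : α → Bool) (l : List α) (c : α) (t : List α)
    (h : l.dropWhile p = c :: t) : p c = false := by
  induction l generalizing c t with
  | nil => simp at h
  | cons a l ih =>
    rw [List.dropWhile_cons] at h
    rcases Bool.eq_false_or_eq_true (p a) with hp | hp
    · rw [hp, if_pos (by simp)] at h
      exact ih c t h
    · rw [hp, if_neg (by simp)] at h
      injection h with h1 h2
      subst h1
      exact hp

theorem key_iff (k u : List Char) (hk : ∀ c ∈ k, c ≠ '(') :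
    ((u == k) || (k ++ ['(']).isPrefixOf u) = (u.takeWhile (fun c => c ≠ '(') == k) := by
  rw [Bool.eq_iff_iff]
  simp only [Bool.or_eq_true, beq_iff_eq, List.isPrefixOf_iff_prefix]
  constructor
  · rintro (rfl | ⟨t, ht⟩)
    · simpa using all_ne_takeWhile u [] hk
    · rw [← ht, List.append_assoc, List.singleton_append, all_ne_takeWhile k ('('::t) hk]
      simp
  · intro h
    rcases hd : u.dropWhile (fun c => c ≠ '(') with _ | ⟨c, t⟩
    · left
      conv_lhs => rw [← List.takeWhile_append_dropWhile (p := fun c => decide (c ≠ '(')) (l := u)]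
      rw [hd, h]; simp
    · right
      have hc : c = '(' := by
        have := dropWhile_head_not _ u c t hd
        simpa using this
      refine ⟨t, ?_⟩
      conv_rhs => rw [← List.takeWhile_append_dropWhile (p := fun c => decide (c ≠ '(')) (l := u)]
      rw [hd, h, hc]
      simp

theorem prefix_iff (k u : List Char) (hk : ∀ c ∈ k, c ≠ '(') :
    k.isPrefixOf u = k.isPrefixOf (u.takeWhile (fun c => c ≠ '(')) := by
  rw [Bool.eq_iff_iff, List.isPrefixOf_iff_prefix, List.isPrefixOf_iff_prefix]
  constructor
  · rintro ⟨t, rfl⟩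
    rw [all_ne_takeWhile k t hk]
    exact ⟨_, rfl⟩
  · intro h
    exact h.trans (List.takeWhile_prefix _)

theorem find?_congr' {α : Type} (l : List α) (f g : α → Bool) (h : ∀ a ∈ l, f a = g a) :
    l.find? f = l.find? g := by
  induction l with
  | nil => rfl
  | cons a l ih =>
    rw [List.find?_cons, List.find?_cons, h a (by simp), ih (fun b hb => h b (by simp [hb]))]

theorem str_beq_ofList (s : String) (l : List Char) : (s == String.ofList l) = (l == s.toList) := by
  rw [Bool.eq_iff_iff]
  simp only [beq_iff_eq]
  constructor
  · intro h; subst h; simp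
  · intro h; rw [show s = String.ofList s.toList by simp, h]

theorem toList_ofList' (l : List Char) : (String.ofList l).toList = l := by simp

theorem get?_mk_eq_find? (l : List (String × String)) (x : String) :
    (PySem.Dict.mk l).get? x = (l.find? (fun p => p.1 == x)).map (·.2) := by
  induction l with
  | nil => rfl
  | cons p l ih =>
    rcases p with ⟨k, v⟩
    rw [PySem.Dict.get?_mk_cons, List.find?_cons]
    cases h : (k == x) <;> simp [h, ih]

theorem dict_get (base : List Char) :
    chTypeDict.get? (String.ofList base)
      = (chTypeTable.find? (fun p => base == p.1.toList)).map (·.2) := by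
  rw [show chTypeDict = PySem.Dict.mk chTypeTable from rfl, get?_mk_eq_find?]
  congr 1
  exact find?_congr' _ _ _ (fun p hp => str_beq_ofList p.1 base)

theorem tableKeysNoParenB : chTypeTable.all (fun p => p.1.toList.all (fun c => c ≠ '(')) = true := by rfl

theorem tableKeysNoParen : ∀ p ∈ chTypeTable, ∀ c ∈ p.1.toList, c ≠ '(' := by
  intro p hp c hc
  have h1 := List.all_eq_true.mp tableKeysNoParenB p hp
  have h2 := List.all_eq_true.mp h1 c hc
  simpa using h2

theorem decimalNoParenB : "DECIMAL".toList.all (fun c => c ≠ '(') = true := by rfl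

theorem decimalNoParen : ∀ c ∈ "DECIMAL".toList, c ≠ '(' := by
  intro c hc
  simpa using List.all_eq_true.mp decimalNoParenB c hc

theorem scanA (u : List Char) :
    chTypeTable.find? (fun p => (u == p.1.toList) || (p.1.toList ++ ['(']).isPrefixOf u)
      = chTypeTable.find? (fun p => u.takeWhile (fun c => c ≠ '(') == p.1.toList) := by
  exact find?_congr' _ _ _ (fun p hp => key_iff p.1.toList u (tableKeysNoParen p hp))

theorem scanNone (v : List Char) :
    chTypeTable.find? (fun p => (('A'::v) == p.1.toList) || (p.1.toList ++ ['(']).isPrefixOf ('A'::v)) = none := by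
  simp [chTypeTable, List.isPrefixOf_iff_prefix, List.cons_prefix_cons]

theorem foldl_str (l : List String) : ∀ s : String, l.foldl (· ++ ·) s = s ++ l.foldl (· ++ ·) "" := by
  induction l with
  | nil => intro s; simp
  | cons x l ih =>
    intro s
    rw [List.foldl_cons, List.foldl_cons, ih (s ++ x), ih ("" ++ x)]
    simp [String.append_assoc]

theorem join_cons (x : String) (l : List String) : String.join (x :: l) = x ++ String.join l := by
  show (x :: l).foldl (· ++ ·) "" = x ++ l.foldl (· ++ ·) ""
  rw [List.foldl_cons, foldl_str]
  simp

theorem joinApp (m : Nat) :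
    "[]" ++ String.join (List.replicate m "[]") = String.join (List.replicate m "[]") ++ "[]" := by
  induction m with
  | zero => rfl
  | succ m ih =>
    rw [List.replicate_succ, join_cons, String.append_assoc, ← ih]

theorem joinRep (m : Nat) :
    String.join (List.replicate (m+1) "[]") = String.join (List.replicate m "[]") ++ "[]" := by
  rw [List.replicate_succ, join_cons, joinApp]

theorem finish_succ (x : List Char) (m : Nat) : chFinish (x, m + 1) = chFinish (x, m) ++ "[]" := by
  simp only [chFinish]
  rw [joinRep, ← String.append_assoc]

theorem chStrip_nul (cs : List Char) (n : Nat)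
    (h : "NULLABLE(".toList.isPrefixOf (PySem.Chars.upper cs) = true) :
    chStrip cs n = chStrip ((cs.drop 9).dropLast) n := by
  have h' : ['N','U','L','L','A','B','L','E','('] <+: PySem.Chars.upper cs := by simpa using h
  rw [chStrip]
  simp [h']

theorem chStrip_arr (cs : List Char) (n : Nat)
    (h9 : ¬ "NULLABLE(".toList.isPrefixOf (PySem.Chars.upper cs) = true)
    (h6 : "ARRAY(".toList.isPrefixOf (PySem.Chars.upper cs) = true) :
    chStrip cs n = chStrip ((cs.drop 6).dropLast) (n + 1) := by
  have h9' : ¬ (['N','U','L','L','A','B','L','E','('] <+: PySem.Chars.upper cs) := by simpa using h9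
  have h6' : ['A','R','R','A','Y','('] <+: PySem.Chars.upper cs := by simpa using h6
  rw [chStrip]
  simp [h9', h6']

theorem chStrip_done (cs : List Char) (n : Nat)
    (h9 : ¬ "NULLABLE(".toList.isPrefixOf (PySem.Chars.upper cs) = true)
    (h6 : ¬ "ARRAY(".toList.isPrefixOf (PySem.Chars.upper cs) = true) :
    chStrip cs n = (cs, n) := by
  have h9' : ¬ (['N','U','L','L','A','B','L','E','('] <+: PySem.Chars.upper cs) := by simpa using h9
  have h6' : ¬ (['A','R','R','A','Y','('] <+: PySem.Chars.upper cs) := by simpa using h6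
  rw [chStrip]
  simp [h9', h6']

theorem chFinish_zero (cs : List Char) :
    chFinish (cs, 0) =
      (match chTypeTable.find? (fun p => (PySem.Chars.upper cs).takeWhile (fun c => c ≠ '(') == p.1.toList) with
       | some p => p.2
       | none =>
         if "DECIMAL".toList.isPrefixOf ((PySem.Chars.upper cs).takeWhile (fun c => c ≠ '(')) then String.ofList cs
         else "VARCHAR") := by
  simp only [chFinish]
  rw [dict_get]
  simp only [toList_ofList']
  cases h : chTypeTable.find? (fun p => (PySem.Chars.upper cs).takeWhile (fun c => c ≠ '(') == p.1.toList) with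
  | none => simp [h, String.join]
  | some p => simp [h, String.join]

theorem chStrip_shift : ∀ (N : Nat) (cs : List Char), cs.length ≤ N → ∀ (n : Nat),
    chStrip cs n = ((chStrip cs 0).1, (chStrip cs 0).2 + n) := by
  intro N
  induction N with
  | zero =>
    intro cs hl n
    rcases cs with _ | ⟨a, cs⟩
    · have e : ∀ m : Nat, chStrip [] m = ([], m) := fun m =>
        chStrip_done [] m (by simp [PySem.Chars.upper]) (by simp [PySem.Chars.upper])
      rw [e, e]
      simp
    · simp at hl
  | succ N ih =>
    intro cs hl n
    by_cases h9 : "NULLABLE(".toList.isPrefixOf (PySem.Chars.upper cs) = true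
    · have hlen := (List.isPrefixOf_iff_prefix.mp h9).length_le
      have hu : (PySem.Chars.upper cs).length = cs.length := by simp [PySem.Chars.upper]
      rw [chStrip_nul cs n h9, chStrip_nul cs 0 h9]
      exact ih _ (by simp at hlen ⊢; omega) n
    · by_cases h6 : "ARRAY(".toList.isPrefixOf (PySem.Chars.upper cs) = true
      · have hlen := (List.isPrefixOf_iff_prefix.mp h6).length_le
        have hu : (PySem.Chars.upper cs).length = cs.length := by simp [PySem.Chars.upper]
        rw [chStrip_arr cs n h9 h6, chStrip_arr cs 0 h9 h6]
        rw [ih _ (by simp at hlen ⊢; omega) (n + 1), ih _ (by simp at hlen ⊢; omega) 1]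
        simp [Prod.ext_iff]
        omega
      · rw [chStrip_done cs n h9 h6, chStrip_done cs 0 h9 h6]
        simp

theorem chA_eq_finish_strip (cs : List Char) : chA cs = chFinish (chStrip cs 0) := by
  fun_induction chA cs with
  | case1 cs h ih =>
    rw [ih, chStrip_nul cs 0 h]
  | case2 cs hn p hf =>
    have hA : ¬ "ARRAY(".toList.isPrefixOf (PySem.Chars.upper cs) = true := by
      intro hc
      rcases List.isPrefixOf_iff_prefix.mp hc with ⟨t, ht⟩
      have e : "ARRAY(".toList = 'A' :: ['R','R','A','Y','('] := rfl
      rw [e, List.cons_append] at ht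
      rw [← ht, scanNone] at hf
      cases hf
    rw [chStrip_done cs 0 hn hA, chFinish_zero, ← scanA, hf]
  | case3 cs hn hf hd =>
    have hA : ¬ "ARRAY(".toList.isPrefixOf (PySem.Chars.upper cs) = true := by
      intro hc
      rcases List.isPrefixOf_iff_prefix.mp hd with ⟨t1, ht1⟩
      rcases List.isPrefixOf_iff_prefix.mp hc with ⟨t2, ht2⟩
      have e1 : "DECIMAL".toList = 'D' :: ['E','C','I','M','A','L'] := rfl
      have e2 : "ARRAY(".toList = 'A' :: ['R','R','A','Y','('] := rfl
      rw [e1, List.cons_append] at ht1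
      rw [e2, List.cons_append] at ht2
      rw [← ht1] at ht2
      exact absurd (List.head_eq_of_cons_eq ht2) (by decide)
    rw [chStrip_done cs 0 hn hA, chFinish_zero, ← scanA, hf,
        ← prefix_iff _ _ decimalNoParen, hd]
    simp
  | case4 cs hn hf hd ha ih =>
    rw [chStrip_arr cs 0 hn ha,
        chStrip_shift ((cs.drop 6).dropLast).length _ le_rfl 1,
        finish_succ, Prod.mk.eta, ih]
  | case5 cs hn hf hd ha he =>
    have hd' : "DECIMAL".toList.isPrefixOf (PySem.Chars.upper cs) = false := Bool.eq_false_iff.mpr hd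
    rw [chStrip_done cs 0 hn ha, chFinish_zero, ← scanA, hf,
        ← prefix_iff _ _ decimalNoParen, hd']
    simp
  | case6 cs hn hf hd ha he =>
    have hd' : "DECIMAL".toList.isPrefixOf (PySem.Chars.upper cs) = false := Bool.eq_false_iff.mpr hd
    rw [chStrip_done cs 0 hn ha, chFinish_zero, ← scanA, hf,
        ← prefix_iff _ _ decimalNoParen, hd']
    simp

-- ===== VERDICT (by name: the statement is the Claim_ definition above) =====
theorem clickhouse_type_to_duckdb_py_spec : Claim_equal_clickhouse_type_to_duckdb_py := by
  intro ch_type _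
  unfold Spec_clickhouse_type_to_duckdb_py clickhouse_type_to_duckdb_py clickhouse_type_to_duckdb_py_alt
  exact chA_eq_finish_strip ch_type.toList
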